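-- pv_equiv track=rewrite | github.com/UnixJunkie/CGRtools | CGRtools/algorithms/sssr.py | __get_unique_chord
-- ===== SOURCE A (Python) =====
-- from typing import Any, Dict, Set, Tuple, Union, TYPE_CHECKING, Type, List, Optional
--
-- def __get_unique_chord(ring: Tuple[int, ...], common: Set[int]) -> Optional[Tuple[int, ...]]:
--     lc = len(common)
--     if len(ring) == lc:
--         if common == set(ring):
--             return ()
--     else:
--         if common == set(ring[:lc]):
--             return (*ring[lc - 1:], ring[0])
--         for _ in range(len(ring) - 1):
--             ring = (*ring[1:], ring[0])
--             if common == set(ring[:lc]):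
--                 return (*ring[lc - 1:], ring[0])
-- ===== SOURCE B (Python) =====
-- def __get_unique_chord(ring, common):
--     n = len(ring)
--     lc = len(common)
--     if n == lc:
--         return () if common == set(ring) else None
--     if lc > n:
--         return None
--     # sliding cyclic window of length lc over ring; valid shift s <=> the
--     # window holds exactly the lc distinct elements of common
--     ext = ring + ring[:lc]
--     cnt = {}
--     have = 0
--     for i in range(lc):
--         x = ext[i]
--         if x in common:
--             c = cnt.get(x, 0) + 1
--             cnt[x] = c
--             if c == 1:
--                 have += 1
--     for s in range(n):
--         if have == lc:
--             rot = ring[s:] + ring[:s]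
--             return rot[lc - 1:] + (rot[0],)
--         x = ext[s]
--         if x in common:
--             c = cnt[x] - 1
--             cnt[x] = c
--             if c == 0:
--                 have -= 1
--         y = ext[s + lc]
--         if y in common:
--             c = cnt.get(y, 0) + 1
--             cnt[y] = c
--             if c == 1:
--                 have += 1
--     return None
-- ===== Notes on version B (the rewrite author's own statement) =====
-- stated objective: faster
-- what changed: A rebuilds the rotated tuple and a fresh set of its lc-prefix for every shift; B scans once with a sliding cyclic window, maintaining a count dictionary and the number of distinct common elements in the window, and reconstructs the chord only for the first valid shift.
import Mathlib
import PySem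

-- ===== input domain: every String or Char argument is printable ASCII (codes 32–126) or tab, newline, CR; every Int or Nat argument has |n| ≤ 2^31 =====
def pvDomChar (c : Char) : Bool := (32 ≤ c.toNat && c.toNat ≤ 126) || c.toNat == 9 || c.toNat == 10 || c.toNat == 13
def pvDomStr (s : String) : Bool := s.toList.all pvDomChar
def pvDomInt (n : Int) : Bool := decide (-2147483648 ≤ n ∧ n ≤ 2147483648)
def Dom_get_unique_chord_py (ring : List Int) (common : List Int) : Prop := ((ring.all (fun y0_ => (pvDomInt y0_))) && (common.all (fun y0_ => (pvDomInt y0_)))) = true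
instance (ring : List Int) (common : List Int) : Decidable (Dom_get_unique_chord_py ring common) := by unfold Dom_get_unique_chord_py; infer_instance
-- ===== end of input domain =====

-- B replaces A's rebuild-a-set-per-rotation scan by a single sliding cyclic window with a
-- count dictionary (objective: faster). Both programs are total; return values only.

-- ===== PORT A =====
-- (*ring[lc-1:], ring[0]) ; ring is nonempty whenever this is evaluated, so ring[0] = ring.headI
def pvChord (ring : List Int) (lc : Int) : List Int :=
  PySem.List.slice ring (some (lc - 1)) none ++ [ring.headI]

-- the 'for _ in range(len(ring)-1)' loop: rotate, test, recurse
def pvALoop (cs : List Int) (lc : Int) : List Int → Nat → Option (List Int)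
  | _, 0 => none
  | ring, k+1 =>
    let ring' := PySem.List.slice ring (some 1) none ++ [ring.headI]  -- (*ring[1:], ring[0]); ring ≠ [] here
    if PySem.Set.equal cs (PySem.Set.ofList (PySem.List.slice ring' none (some lc))) then
      some (pvChord ring' lc)
    else pvALoop cs lc ring' k

def get_unique_chord_py (ring : List Int) (common : List Int) : Option (List Int) :=
  let cs := PySem.Set.ofList common   -- 'common' is a Python set: its distinct elements
  let lc : Int := cs.length
  if (ring.length : Int) = lc then
    if PySem.Set.equal cs (PySem.Set.ofList ring) then some [] else none
  else
    if PySem.Set.equal cs (PySem.Set.ofList (PySem.List.slice ring none (some lc))) then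
      some (pvChord ring lc)
    else
      pvALoop cs lc ring (ring.length - 1)

-- ===== PORT B =====
-- Source B's "add y to the window counter" step (shared by the init loop and the slide loop)
def pvAdd (cs : List Int) (st : PySem.Dict Int Int × Int) (y : Int) : PySem.Dict Int Int × Int :=
  if PySem.Set.contains cs y then
    let c := st.1.getD y 0 + 1
    (st.1.insert y c, if c = 1 then st.2 + 1 else st.2)
  else st

-- Source B's "remove x from the window counter" step; cnt[x] is present whenever read (cnt.getD models it)
def pvDrop (cs : List Int) (st : PySem.Dict Int Int × Int) (x : Int) : PySem.Dict Int Int × Int :=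
  if PySem.Set.contains cs x then
    let c := st.1.getD x 0 - 1
    (st.1.insert x c, if c = 0 then st.2 - 1 else st.2)
  else st

-- 'for s in range(n)': test the window, else slide it by one
def pvBLoop (cs : List Int) (lc : Nat) (ring ext : List Int) :
    PySem.Dict Int Int × Int → Nat → Nat → Option (List Int)
  | _, _, 0 => none
  | st, s, k+1 =>
    if st.2 = (lc : Int) then
      let rot := ring.drop s ++ ring.take s                      -- ring[s:] + ring[:s]
      some (PySem.List.slice rot (some ((lc : Int) - 1)) none ++ [rot.headI])  -- rot[lc-1:] + (rot[0],)
    else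
      let st1 := pvDrop cs st (ext.getD s 0)          -- x = ext[s]        (s < len(ext))
      let st2 := pvAdd cs st1 (ext.getD (s + lc) 0)   -- y = ext[s+lc]     (s+lc < len(ext))
      pvBLoop cs lc ring ext st2 (s+1) k

def get_unique_chord_py_alt (ring : List Int) (common : List Int) : Option (List Int) :=
  let cs := PySem.Set.ofList common   -- 'common' is a Python set: its distinct elements
  let n := ring.length
  let lc := cs.length
  if n = lc then
    if PySem.Set.equal cs (PySem.Set.ofList ring) then some [] else none
  else if lc > n then none
  else
    let ext := ring ++ ring.take lc                    -- ext = ring + ring[:lc]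
    let st0 := (ext.take lc).foldl (pvAdd cs) (PySem.Dict.empty, 0)  -- for i in range(lc): x = ext[i]
    pvBLoop cs lc ring ext st0 0 n

-- ===== PRECONDITION & SPEC =====
def Spec_get_unique_chord_py (ring : List Int) (common : List Int) (out : Option (List Int)) : Prop := out = get_unique_chord_py_alt ring common
instance (ring : List Int) (common : List Int) (out : Option (List Int)) : Decidable (Spec_get_unique_chord_py ring common out) := by unfold Spec_get_unique_chord_py; infer_instance

-- ===== CLAIM (what is proved, stated in full; the proofs are below) =====
def Claim_equal_get_unique_chord_py : Prop := ∀ (ring : List Int) (common : List Int), Dom_get_unique_chord_py ring common → Spec_get_unique_chord_py ring common (get_unique_chord_py ring common)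

-- ===== LEMMAS AND PROOFS =====

-- the rotation by s of ring (for s < |ring| this is ring[s:] + ring[:s])
def pvRot (ring : List Int) (s : Nat) : List Int := ring.rotate s

def pvCond (cs ring : List Int) (lc s : Nat) : Bool :=
  PySem.Set.equal cs (PySem.Set.ofList ((pvRot ring s).take lc))

-- reference search: first shift s (with the given fuel) whose window's set equals cs
def pvSearch (cs ring : List Int) (lc : Nat) : Nat → Nat → Option (List Int)
  | _, 0 => none
  | s, k+1 =>
    if pvCond cs ring lc s then some (pvChord (pvRot ring s) (lc : Int))
    else pvSearch cs ring lc (s+1) k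

-- the sliding window of B at shift s
def pvWin (ext : List Int) (lc s : Nat) : List Int := (ext.drop s).take lc

-- counter/haveness invariant of B's loop state with respect to a window w
def pvCnt (cs : List Int) (st : PySem.Dict Int Int × Int) (w : List Int) : Prop :=
  (∀ z ∈ cs, st.1.getD z 0 = (w.count z : Int)) ∧
  st.2 = ((cs.filter (fun z => decide (z ∈ w))).length : Int)

lemma pv_rot1 (l : List Int) (h : l ≠ []) : l.drop 1 ++ l.take 1 = l.rotate 1 := by
  rw [List.rotate_eq_drop_append_take]
  exact Nat.one_le_iff_ne_zero.mpr (fun h0 => h (List.length_eq_zero_iff.mp h0))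

lemma pv_rot_succ (l : List Int) (s : Nat) (h : l ≠ []) :
    (l.rotate s).drop 1 ++ (l.rotate s).take 1 = l.rotate (s+1) := by
  have hne : l.rotate s ≠ [] := by
    intro h0
    have := congrArg List.length h0
    simp at this
    exact h this
  rw [pv_rot1 _ hne, List.rotate_rotate]

lemma pv_take_one (l : List Int) (h : l ≠ []) : l.take 1 = [l.headI] := by
  cases l with
  | nil => simp at h
  | cons a t => simp [List.headI]

lemma pv_filter_len_update (cs : List Int) (hnd : cs.Nodup) (p q : Int → Bool) (x : Int)
    (hx : x ∈ cs) (hagree : ∀ z ∈ cs, z ≠ x → q z = p z) :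
    ((cs.filter q).length : Int) =
      (cs.filter p).length + (if q x then (1:Int) else 0) - (if p x then (1:Int) else 0) := by
  induction cs with
  | nil => simp at hx
  | cons a t ih =>
      have hnd' := List.nodup_cons.mp hnd
      rcases List.mem_cons.mp hx with rfl | hxt
      · have hft : t.filter q = t.filter p := by
          apply List.filter_congr
          intro z hz
          exact hagree z (List.mem_cons_of_mem _ hz) (fun he => hnd'.1 (he ▸ hz))
        by_cases hq : q x <;> by_cases hp : p x <;>
          simp [hq, hp, hft]
      · have hax : a ≠ x := fun he => hnd'.1 (he ▸ hxt)
        have hqa : q a = p a := hagree a List.mem_cons_self hax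
        have := ih hnd'.2 hxt (fun z hz hzx => hagree z (List.mem_cons_of_mem _ hz) hzx)
        by_cases hp : p a <;>
          simp [hp, hqa] <;> omega

lemma pv_filter_congr_mem (cs w w' : List Int) (h : ∀ z ∈ cs, z ∈ w ↔ z ∈ w') :
    cs.filter (fun z => decide (z ∈ w)) = cs.filter (fun z => decide (z ∈ w')) := by
  apply List.filter_congr
  intro z hz
  simp [h z hz]

-- adding y extends the window on the right
lemma pv_add_step (cs : List Int) (hnd : cs.Nodup) (st : PySem.Dict Int Int × Int)
    (w : List Int) (y : Int) (h : pvCnt cs st w) : pvCnt cs (pvAdd cs st y) (w ++ [y]) := by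
  obtain ⟨h1, h2⟩ := h
  by_cases hy : y ∈ cs
  · have hc : PySem.Set.contains cs y = true := (PySem.Set.contains_iff cs y).mpr hy
    constructor
    · intro z hz
      simp only [pvAdd, hc, if_true, PySem.Dict.getD_insert]
      by_cases hzy : z = y
      · subst hzy
        rw [if_pos rfl, h1 z hz]
        simp [List.count_append]
      · rw [if_neg hzy, h1 z hz]
        simp [List.count_append, Ne.symm hzy]
    · simp only [pvAdd, hc, if_true]
      have hagree : ∀ z ∈ cs, z ≠ y →
          (decide (z ∈ w ++ [y])) = (decide (z ∈ w)) := by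
        intro z _ hzy
        simp [List.mem_append, hzy]
      have hupd := pv_filter_len_update cs hnd (fun z => decide (z ∈ w))
        (fun z => decide (z ∈ w ++ [y])) y hy hagree
      by_cases hmem : y ∈ w
      · have hcnt : st.1.getD y 0 + 1 ≠ 1 := by
          rw [h1 y hy]
          have : 0 < w.count y := List.count_pos_iff.mpr hmem
          omega
        rw [if_neg hcnt, h2, hupd]
        simp [hmem]
      · have hcnt : st.1.getD y 0 + 1 = 1 := by
          rw [h1 y hy, List.count_eq_zero_of_not_mem hmem]
          simp
        rw [if_pos hcnt, h2, hupd]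
        simp [hmem]
  · have hc : PySem.Set.contains cs y = false := by
      rw [← Bool.not_eq_true, PySem.Set.contains_iff]
      exact hy
    constructor
    · intro z hz
      simp only [pvAdd, hc, Bool.false_eq_true, if_false]
      rw [h1 z hz]
      have hzy : y ≠ z := fun he => hy (he ▸ hz)
      simp [List.count_append, hzy]
    · simp only [pvAdd, hc, Bool.false_eq_true, if_false]
      rw [h2, pv_filter_congr_mem cs w (w ++ [y]) (by
        intro z hz
        have hzy : z ≠ y := fun he => hy (he ▸ hz)
        simp [List.mem_append, hzy])]

-- dropping x removes the window's head
lemma pv_drop_step (cs : List Int) (hnd : cs.Nodup) (st : PySem.Dict Int Int × Int)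
    (w : List Int) (x : Int) (h : pvCnt cs st (x :: w)) : pvCnt cs (pvDrop cs st x) w := by
  obtain ⟨h1, h2⟩ := h
  by_cases hx : x ∈ cs
  · have hc : PySem.Set.contains cs x = true := (PySem.Set.contains_iff cs x).mpr hx
    constructor
    · intro z hz
      simp only [pvDrop, hc, if_true, PySem.Dict.getD_insert]
      by_cases hzx : z = x
      · subst hzx
        rw [if_pos rfl, h1 z hz]
        simp
      · rw [if_neg hzx, h1 z hz]
        simp [Ne.symm hzx]
    · simp only [pvDrop, hc, if_true]
      have hagree : ∀ z ∈ cs, z ≠ x →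
          (decide (z ∈ w)) = (decide (z ∈ x :: w)) := by
        intro z _ hzx
        simp [List.mem_cons, hzx]
      have hupd := pv_filter_len_update cs hnd (fun z => decide (z ∈ x :: w))
        (fun z => decide (z ∈ w)) x hx hagree
      by_cases hmem : x ∈ w
      · have hcnt : st.1.getD x 0 - 1 ≠ 0 := by
          rw [h1 x hx]
          have : 0 < w.count x := List.count_pos_iff.mpr hmem
          simp
          omega
        rw [if_neg hcnt, h2, hupd]
        simp [hmem]
      · have hcnt : st.1.getD x 0 - 1 = 0 := by
          rw [h1 x hx]
          simp [List.count_eq_zero_of_not_mem hmem]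
        rw [if_pos hcnt, h2, hupd]
        simp [hmem]
  · have hc : PySem.Set.contains cs x = false := by
      rw [← Bool.not_eq_true, PySem.Set.contains_iff]
      exact hx
    constructor
    · intro z hz
      simp only [pvDrop, hc, Bool.false_eq_true, if_false]
      rw [h1 z hz]
      have hzx : x ≠ z := fun he => hx (he ▸ hz)
      simp [hzx]
    · simp only [pvDrop, hc, Bool.false_eq_true, if_false]
      rw [h2, pv_filter_congr_mem cs (x :: w) w (by
        intro z hz
        have hzx : z ≠ x := fun he => hx (he ▸ hz)
        simp [List.mem_cons, hzx])]

lemma pv_fold_add (cs : List Int) (hnd : cs.Nodup) :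
    ∀ (ys w : List Int) (st : PySem.Dict Int Int × Int), pvCnt cs st w →
      pvCnt cs (ys.foldl (pvAdd cs) st) (w ++ ys) := by
  intro ys
  induction ys with
  | nil => intro w st h; simpa using h
  | cons y t ih =>
      intro w st h
      have h1 := pv_add_step cs hnd st w y h
      have h2 := ih (w ++ [y]) (pvAdd cs st y) h1
      simpa [List.append_assoc] using h2

lemma pv_cnt_init (cs : List Int) (hnd : cs.Nodup) (ys : List Int) :
    pvCnt cs (ys.foldl (pvAdd cs) (PySem.Dict.empty, 0)) ys := by
  have h0 : pvCnt cs ((PySem.Dict.empty : PySem.Dict Int Int), (0 : Int)) [] := by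
    constructor
    · intro z hz; simp [PySem.Dict.getD_empty]
    · simp
  simpa using pv_fold_add cs hnd ys [] _ h0

-- the condition "set(window) == cs" for a window of length |cs| is "every element of cs is in the window"
lemma pv_cond_iff (cs w : List Int) (hnd : cs.Nodup) (hlen : w.length = cs.length) :
    PySem.Set.equal cs (PySem.Set.ofList w) = true ↔
      (cs.filter (fun z => decide (z ∈ w))).length = cs.length := by
  constructor
  · intro he
    have hmemiff := (PySem.Set.equal_iff cs (PySem.Set.ofList w)).mp he
    apply List.length_filter_eq_length_iff.mpr
    intro a ha
    have : a ∈ w := (PySem.Set.mem_ofList w a).mp ((hmemiff a).mp ha)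
    simpa using this
  · intro hl
    have hsub : cs ⊆ w := by
      intro a ha
      have := List.length_filter_eq_length_iff.mp hl a ha
      simpa using this
    have hsp := List.Nodup.subperm hnd hsub
    obtain ⟨l', hperm, hsl⟩ := hsp
    have hl' : l' = w := hsl.eq_of_length (by rw [hperm.length_eq, hlen])
    apply (PySem.Set.equal_iff cs (PySem.Set.ofList w)).mpr
    intro a
    rw [PySem.Set.mem_ofList]
    constructor
    · exact fun h => hsub h
    · intro h
      exact hperm.mem_iff.mp (hl' ▸ h)

-- the window of B equals the prefix of A's rotation
lemma pv_win_eq_rot (ring : List Int) (lc s : Nat) (hs : s < ring.length) (hlc : lc < ring.length) :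
    pvWin (ring ++ ring.take lc) lc s = (pvRot ring s).take lc := by
  unfold pvWin pvRot
  rw [List.rotate_eq_drop_append_take (le_of_lt hs)]
  rw [List.drop_append]
  have hs0 : s - ring.length = 0 := by omega
  rw [hs0, List.drop_zero]
  rw [List.take_append, List.take_append, List.take_take, List.take_take]
  have hld : (ring.drop s).length = ring.length - s := List.length_drop
  rw [hld]
  rw [Nat.min_eq_left (by omega), Nat.min_eq_left (by omega)]

lemma pv_win_len (ring : List Int) (lc s : Nat) (hs : s < ring.length) (hlc : lc < ring.length) :
    (pvWin (ring ++ ring.take lc) lc s).length = lc := by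
  rw [pv_win_eq_rot ring lc s hs hlc]
  simp only [pvRot, List.length_take, List.length_rotate]
  omega

-- window decomposition for the slide
lemma pv_win_head (ext : List Int) (lc s : Nat) (hlc : 1 ≤ lc) (h : s + lc ≤ ext.length) :
    pvWin ext lc s = ext.getD s 0 :: (ext.drop (s+1)).take (lc - 1) := by
  unfold pvWin
  have hsl : s < ext.length := by omega
  obtain ⟨m, rfl⟩ : ∃ m, lc = m + 1 := ⟨lc - 1, by omega⟩
  rw [List.drop_eq_getElem_cons hsl, List.getD_eq_getElem ext 0 hsl,
    List.take_succ_cons]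
  norm_num

lemma pv_win_last (ext : List Int) (lc s : Nat) (hlc : 1 ≤ lc) (h : s + lc < ext.length) :
    pvWin ext lc (s+1) = (ext.drop (s+1)).take (lc - 1) ++ [ext.getD (s + lc) 0] := by
  unfold pvWin
  obtain ⟨m, rfl⟩ : ∃ m, lc = m + 1 := ⟨lc - 1, by omega⟩
  have hlen2 : m < (ext.drop (s+1)).length := by
    rw [List.length_drop]
    omega
  rw [List.take_add_one, List.getElem?_eq_getElem hlen2]
  have hidx : s + (m + 1) < ext.length := by omega
  rw [List.getD_eq_getElem ext 0 hidx]
  have : (ext.drop (s+1))[m] = ext[s + (m + 1)] := by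
    rw [List.getElem_drop]
    congr 1
    omega
  simp [this]

-- A's rotation loop is the reference search from shift s+1
lemma pv_aLoop_eq (cs ring : List Int) (hne : ring ≠ []) :
    ∀ (k s : Nat),
      pvALoop cs (cs.length : Int) (ring.rotate s) k = pvSearch cs ring cs.length (s+1) k := by
  intro k
  induction k with
  | zero => intro s; rfl
  | succ k ih =>
      intro s
      have hne' : ring.rotate s ≠ [] := by
        intro h0
        have := congrArg List.length h0
        simp at this
        exact hne this
      have hrot : PySem.List.slice (ring.rotate s) (some 1) none ++ [(ring.rotate s).headI]
          = ring.rotate (s+1) := by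
        rw [PySem.List.slice_from_one, ← List.drop_one, ← pv_take_one _ hne']
        exact pv_rot_succ ring s hne
      simp only [pvALoop, hrot, PySem.List.slice_to_natCast]
      rw [ih (s+1)]
      simp only [pvSearch, pvCond, pvRot]

-- B's loop is the reference search, given the invariant
lemma pv_bLoop_eq (cs ring : List Int) (hnd : cs.Nodup) (hlc : cs.length < ring.length) :
    ∀ (k s : Nat) (st : PySem.Dict Int Int × Int), s + k = ring.length →
      pvCnt cs st (pvWin (ring ++ ring.take cs.length) cs.length s) →
      pvBLoop cs cs.length ring (ring ++ ring.take cs.length) st s k =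
        pvSearch cs ring cs.length s k := by
  intro k
  induction k with
  | zero => intro s st _ _; rfl
  | succ k ih =>
      intro s st hsk hcnt
      have hs : s < ring.length := by omega
      have hextlen : (ring ++ ring.take cs.length).length = ring.length + cs.length := by
        rw [List.length_append, List.length_take]
        omega
      have hwin := pv_win_eq_rot ring cs.length s hs hlc
      have hwl : (pvWin (ring ++ ring.take cs.length) cs.length s).length = cs.length :=
        pv_win_len ring cs.length s hs hlc
      have hcondiff := pv_cond_iff cs (pvWin (ring ++ ring.take cs.length) cs.length s) hnd hwl
      by_cases hif : st.2 = (cs.length : Int)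
      · have hfl : (cs.filter
            (fun z => decide (z ∈ pvWin (ring ++ ring.take cs.length) cs.length s))).length
            = cs.length := by
          have h2 := hcnt.2
          rw [hif] at h2
          exact_mod_cast h2.symm
        have hcond : pvCond cs ring cs.length s = true := by
          unfold pvCond
          rw [← hwin]
          exact hcondiff.mpr hfl
        have hroteq : ring.drop s ++ ring.take s = pvRot ring s := by
          rw [pvRot, List.rotate_eq_drop_append_take (le_of_lt hs)]
        simp only [pvBLoop, pvSearch, hif, if_pos, hcond, hroteq]
        rfl
      · have hcond : pvCond cs ring cs.length s = false := by
          apply Bool.eq_false_iff.mpr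
          intro he
          unfold pvCond at he
          rw [← hwin] at he
          exact hif (by rw [hcnt.2, hcondiff.mp he])
        have hlc1 : 1 ≤ cs.length := by
          by_contra h0
          have hcs : cs = [] := by
            have : cs.length = 0 := by omega
            exact List.length_eq_zero_iff.mp this
          apply hif
          rw [hcnt.2, hcs]
          simp
        have hdec1 := pv_win_head (ring ++ ring.take cs.length) cs.length s hlc1 (by omega)
        have hdec2 := pv_win_last (ring ++ ring.take cs.length) cs.length s hlc1 (by omega)
        have hstep1 : pvCnt cs (pvDrop cs st ((ring ++ ring.take cs.length).getD s 0))
            (((ring ++ ring.take cs.length).drop (s+1)).take (cs.length - 1)) := by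
          apply pv_drop_step cs hnd st _ _
          rw [← hdec1]
          exact hcnt
        have hstep2 : pvCnt cs
            (pvAdd cs (pvDrop cs st ((ring ++ ring.take cs.length).getD s 0))
              ((ring ++ ring.take cs.length).getD (s + cs.length) 0))
            (pvWin (ring ++ ring.take cs.length) cs.length (s+1)) := by
          rw [hdec2]
          exact pv_add_step cs hnd _ _ _ hstep1
        simp only [pvBLoop, pvSearch, hif, hcond, if_false, Bool.false_eq_true]
        exact ih (s+1) _ (by omega) hstep2

-- when |cs| > |ring| the search never succeeds
lemma pv_cond_false_of_big (cs ring : List Int) (hnd : cs.Nodup) (h : ring.length < cs.length)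
    (lc s : Nat) : pvCond cs ring lc s = false := by
  apply Bool.eq_false_iff.mpr
  intro he
  unfold pvCond at he
  have hmem := (PySem.Set.equal_iff _ _).mp he
  have hsub : cs ⊆ (pvRot ring s).take lc :=
    fun {a} ha => (PySem.Set.mem_ofList _ a).mp ((hmem a).mp ha)
  have hle := (List.Nodup.subperm hnd hsub).length_le
  have hle2 : ((pvRot ring s).take lc).length ≤ ring.length := by
    simp only [pvRot, List.length_take, List.length_rotate]
    omega
  omega

lemma pv_search_none (cs ring : List Int) (lc : Nat)
    (h : ∀ s, pvCond cs ring lc s = false) : ∀ k s, pvSearch cs ring lc s k = none := by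
  intro k
  induction k with
  | zero => intro s; rfl
  | succ k ih => intro s; simp [pvSearch, h s, ih]

-- A's else-branch (initial test + rotation loop) is the reference search over all n shifts
lemma pv_a_eq_search (cs ring : List Int) (hne : ring ≠ []) :
    (if PySem.Set.equal cs (PySem.Set.ofList (ring.take cs.length)) then
       some (pvChord ring (cs.length : Int))
     else pvALoop cs (cs.length : Int) ring (ring.length - 1))
      = pvSearch cs ring cs.length 0 ring.length := by
  have hpos : 0 < ring.length := List.length_pos_iff.mpr hne
  obtain ⟨m, hm⟩ : ∃ m, ring.length = m + 1 := ⟨ring.length - 1, by omega⟩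
  rw [hm]
  have hc0 : pvCond cs ring cs.length 0
      = PySem.Set.equal cs (PySem.Set.ofList (ring.take cs.length)) := by
    simp [pvCond, pvRot, List.rotate_zero]
  have hl0 : pvALoop cs (cs.length : Int) ring m = pvSearch cs ring cs.length 1 m := by
    have := pv_aLoop_eq cs ring hne m 0
    rwa [List.rotate_zero] at this
  have hch : pvChord ring (cs.length : Int) = pvChord (pvRot ring 0) (cs.length : Int) := by
    rw [pvRot, List.rotate_zero]
  simp only [pvSearch, hc0, hch]
  have hm1 : m + 1 - 1 = m := by omega
  rw [hm1] at *
  rw [hl0]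

-- ===== VERDICT (by name: the statement is the Claim_ definition above) =====
theorem get_unique_chord_py_spec : Claim_equal_get_unique_chord_py := by
  intro ring common _
  unfold Spec_get_unique_chord_py get_unique_chord_py get_unique_chord_py_alt
  have hnd := PySem.Set.nodup_ofList common
  by_cases h1 : ring.length = (PySem.Set.ofList common).length
  · rw [if_pos (by exact_mod_cast h1 : ((ring.length : Int) = ((PySem.Set.ofList common).length : Int))), if_pos h1]
  · rw [if_neg (by exact_mod_cast h1 : ¬ ((ring.length : Int) = ((PySem.Set.ofList common).length : Int))), if_neg h1]
    rw [PySem.List.slice_to_natCast]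
    by_cases h2 : (PySem.Set.ofList common).length > ring.length
    · rw [if_pos h2]
      rcases List.eq_nil_or_concat ring with hrn | ⟨_, _, hrc⟩
      · -- ring = []: the initial test fails (cs is nonempty) and the loop has no fuel
        subst hrn
        have hne : PySem.Set.equal (PySem.Set.ofList common)
            (PySem.Set.ofList (List.take (PySem.Set.ofList common).length ([] : List Int))) = false := by
          apply Bool.eq_false_iff.mpr
          intro he
          have hmem := (PySem.Set.equal_iff _ _).mp he
          obtain ⟨a, ha⟩ := List.exists_mem_of_length_pos (by simpa using h2 :
            0 < (PySem.Set.ofList common).length)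
          have := (hmem a).mp ha
          simp at this
        rw [hne]
        simp [pvALoop]
      · -- ring ≠ []: A is the full search, which never succeeds since |cs| > |ring|
        have hne : ring ≠ [] := by
          rw [hrc]
          simp
        rw [pv_a_eq_search _ _ hne]
        exact pv_search_none _ _ _
          (fun s => pv_cond_false_of_big (PySem.Set.ofList common) ring hnd h2 _ s)
          ring.length 0
    · rw [if_neg h2]
      have hlc : (PySem.Set.ofList common).length < ring.length := by omega
      have hne : ring ≠ [] := by
        intro h0
        rw [h0] at hlc
        simp at hlc
      rw [pv_a_eq_search _ _ hne]
      rw [pv_bLoop_eq (PySem.Set.ofList common) ring hnd hlc ring.length 0 _ (by omega)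
        (by
          rw [pvWin, List.drop_zero]
          exact pv_cnt_init _ hnd _)]
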